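-- pv_equiv track=rewrite | github.com/Thitatpon-Niwatwong/edabit | Strngs.py | uncensor
-- ===== SOURCE A (Python) =====
-- def uncensor(txt, vowels):
--     sum = []
--     stat = 0
--     for a in txt:
--         if a == '*':
--             sum.append(vowels[stat])
--             stat += 1
--         else:
--             sum.append(a)
--     return sum
-- ===== SOURCE B (Python) =====
-- def uncensor(txt, vowels):
--     parts = txt.split('*')
--     out = [c for c in parts[0]]
--     i = 0
--     for part in parts[1:]:
--         out.append(vowels[i])
--         out.extend(part)
--         i += 1
--     return out
-- ===== Notes on version B (the rewrite author's own statement) =====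
-- stated objective: alternative
-- what changed: B splits txt on '*' once and interleaves successive vowels between the resulting segments, instead of A's char-by-char scan with a vowel counter.
import Mathlib
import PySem

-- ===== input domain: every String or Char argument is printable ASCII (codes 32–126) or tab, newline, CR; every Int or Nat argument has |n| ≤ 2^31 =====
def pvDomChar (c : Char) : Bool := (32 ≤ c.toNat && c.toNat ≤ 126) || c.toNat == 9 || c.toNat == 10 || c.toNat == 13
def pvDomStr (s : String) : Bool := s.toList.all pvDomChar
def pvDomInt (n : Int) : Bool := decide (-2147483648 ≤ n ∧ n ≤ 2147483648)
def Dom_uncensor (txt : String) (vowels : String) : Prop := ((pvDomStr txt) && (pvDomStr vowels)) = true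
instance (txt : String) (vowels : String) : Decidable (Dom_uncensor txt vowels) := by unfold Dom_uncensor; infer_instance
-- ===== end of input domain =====

-- B splits txt on '*' once and interleaves successive vowels between the segments,
-- instead of A's char-by-char scan with a vowel counter (objective: alternative).

-- ===== PORT A =====
-- A: one forward pass; on '*' append vowels[stat] (a 1-char string) and bump stat, else append the char.
-- vowels[stat] (stat ≥ 0 always) is ported through the char list with pyGetD; under Pre_ the
-- index is always in range, so the default is never read (Python's IndexError is outside Pre_).
def uncensor (txt : String) (vowels : String) : List String :=
  (txt.toList.foldl
    (fun (st : List String × Int) a =>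
      if a = '*' then (st.1 ++ [String.ofList [PySem.List.pyGetD vowels.toList st.2 'a']], st.2 + 1)
      else (st.1 ++ [String.ofList [a]], st.2))
    ([], 0)).1

-- ===== PORT B =====
-- B: parts = txt.split('*'); start from the chars of parts[0]; for each later segment
-- append vowels[i] then the segment's chars.  Python's str.split on a single-char
-- separator is exactly Mathlib's List.splitOn on the char list (empty string → [[]]).
def uncensor_alt (txt : String) (vowels : String) : List String :=
  match txt.toList.splitOn '*' with
  | [] => []   -- unreachable: splitOn never returns []
  | p0 :: rest =>
    (rest.foldl
      (fun (st : List String × Int) part =>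
        (st.1 ++ [String.ofList [PySem.List.pyGetD vowels.toList st.2 'a']]
              ++ part.map (fun c => String.ofList [c]), st.2 + 1))
      (p0.map (fun c => String.ofList [c]), 0)).1

-- ===== PRECONDITION & SPEC =====
-- Pre_ excludes exactly the inputs where Python A raises IndexError: more '*' in txt than vowels has characters.
def Pre_uncensor (txt : String) (vowels : String) : Prop :=
  txt.toList.count '*' ≤ vowels.toList.length
instance (txt : String) (vowels : String) : Decidable (Pre_uncensor txt vowels) := by
  unfold Pre_uncensor; infer_instance

def pvWitness_uncensor : String × String := ("c*d*r", "aeiou")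

def Spec_uncensor (txt : String) (vowels : String) (out : List String) : Prop := out = uncensor_alt txt vowels
instance (txt : String) (vowels : String) (out : List String) : Decidable (Spec_uncensor txt vowels out) := by unfold Spec_uncensor; infer_instance

-- ===== CLAIM (what is proved, stated in full; the proofs are below) =====
def Claim_equal_uncensor : Prop := ∀ (txt : String) (vowels : String), Dom_uncensor txt vowels → Pre_uncensor txt vowels → Spec_uncensor txt vowels (uncensor txt vowels)

-- ===== LEMMAS AND PROOFS =====

-- the value of A's scan of l with s asterisks already seen to the left
def pvRender (V : List Char) : List Char → Int → List String
  | [], _ => []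
  | c :: rest, s =>
    if c = '*' then String.ofList [PySem.List.pyGetD V s 'a'] :: pvRender V rest (s + 1)
    else String.ofList [c] :: pvRender V rest s

theorem pvFoldA (V : List Char) (l : List Char) :
    ∀ (acc : List String) (s : Int),
      (l.foldl
        (fun (st : List String × Int) a =>
          if a = '*' then (st.1 ++ [String.ofList [PySem.List.pyGetD V st.2 'a']], st.2 + 1)
          else (st.1 ++ [String.ofList [a]], st.2))
        (acc, s)).1 = acc ++ pvRender V l s := by
  induction l with
  | nil => intro acc s; simp [pvRender]
  | cons c rest ih =>
    intro acc s
    by_cases hc : c = '*'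
    · simp [List.foldl, hc, pvRender, ih]
    · simp [List.foldl, hc, pvRender, ih]

-- the value of B's interleave loop over the segments after the first, starting at vowel index s
def pvInterleave (V : List Char) : List (List Char) → Int → List String
  | [], _ => []
  | p :: ps, s =>
    String.ofList [PySem.List.pyGetD V s 'a'] :: p.map (fun c => String.ofList [c])
      ++ pvInterleave V ps (s + 1)

theorem pvFoldB (V : List Char) (ps : List (List Char)) :
    ∀ (acc : List String) (s : Int),
      (ps.foldl
        (fun (st : List String × Int) part =>
          (st.1 ++ [String.ofList [PySem.List.pyGetD V st.2 'a']]
                ++ part.map (fun c => String.ofList [c]), st.2 + 1))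
        (acc, s)).1 = acc ++ pvInterleave V ps s := by
  induction ps with
  | nil => intro acc s; simp [pvInterleave]
  | cons p ps ih =>
    intro acc s
    rw [List.foldl_cons, ih]
    simp [pvInterleave]

-- split-then-interleave computes exactly A's rendering
theorem pvSplitRender (V : List Char) (l : List Char) :
    ∀ (s : Int),
      (match l.splitOn '*' with
       | [] => []
       | p0 :: rest => p0.map (fun c => String.ofList [c]) ++ pvInterleave V rest s)
      = pvRender V l s := by
  induction l with
  | nil => intro s; simp [List.splitOn, List.splitOnP, List.splitOnP.go, pvRender, pvInterleave]
  | cons c t ih =>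
    intro s
    have hne := List.splitOnP_ne_nil (fun a => a == '*') t
    by_cases hc : c = '*'
    · have : (c :: t).splitOn '*' = [] :: t.splitOn '*' := by
        simp [List.splitOn, List.splitOnP_cons, hc]
      rw [this]
      cases ht : t.splitOn '*' with
      | nil => exact absurd ht hne
      | cons q qs =>
        have iht := ih (s + 1)
        rw [ht] at iht
        simp only [pvRender, hc, if_pos rfl, pvInterleave]
        simp only [List.map_nil, List.nil_append] at iht ⊢
        simpa using iht
    · have : (c :: t).splitOn '*' = (t.splitOn '*').modifyHead (List.cons c) := by
        simp [List.splitOn, List.splitOnP_cons, hc]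
      rw [this]
      cases ht : t.splitOn '*' with
      | nil => exact absurd ht hne
      | cons q qs =>
        have iht := ih s
        rw [ht] at iht
        dsimp only at iht
        simp only [List.modifyHead, pvRender, if_neg hc, List.map_cons]
        simp only [List.cons_append]
        rw [iht]

-- ===== VERDICT (by name: the statement is the Claim_ definition above) =====
theorem uncensor_spec : Claim_equal_uncensor := by
  intro txt vowels _ _
  unfold Spec_uncensor uncensor uncensor_alt
  rw [pvFoldA vowels.toList txt.toList [] 0, List.nil_append]
  have h := pvSplitRender vowels.toList txt.toList 0
  cases ht : txt.toList.splitOn '*' with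
  | nil => exact absurd ht (List.splitOnP_ne_nil _ _)
  | cons p0 rest =>
    rw [ht] at h
    dsimp only at h ⊢
    rw [pvFoldB vowels.toList rest (p0.map (fun c => String.ofList [c])) 0]
    exact h.symm
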